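-- pv_equiv track=rewrite | github.com/dalver99/ktcodemasters | done/TrailingZero.py | find_minimum_trailing_zero
-- ===== SOURCE A (Python) =====
-- def trailing_zero_count(x):
--     count = 0
--     while x >= 5:
--         x //= 5
--         count += x
--     return count
--
-- def find_minimum_trailing_zero(n):
--     left, right = 0, n * 5  # upper bound is sufficient to find the answer
--     result = -1
--
--     while left <= right:
--         mid = (left + right) // 2
--         zeros = trailing_zero_count(mid)
--
--         if zeros >= n:
--             result = mid
--             right = mid - 1
--         else:
--             left = mid + 1
--
--     return result
-- ===== SOURCE B (Python) =====
-- def trailing_zero_count(x):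
--     count = 0
--     while x >= 5:
--         x //= 5
--         count += x
--     return count
--
-- def find_minimum_trailing_zero(n):
--     if n < 0:
--         return -1
--     # the answer is 0 or a multiple of 5, and is > 4*n (since tz(m) <= (m-1)/4);
--     # start at the largest multiple of 5 <= 4*n and walk up in steps of 5.
--     m = 4 * n - (4 * n) % 5
--     while trailing_zero_count(m) < n:
--         m += 5
--     return m
-- ===== Notes on version B (the rewrite author's own statement) =====
-- stated objective: alternative
-- what changed: Replaced the binary search over [0, 5n] by arithmetic: since tz(m) <= (m-1)/4 the answer exceeds 4n, and it is 0 or a multiple of 5, so B starts at the largest multiple of 5 not above 4n and walks up in steps of 5 until the trailing-zero count reaches n.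
import Mathlib
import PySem

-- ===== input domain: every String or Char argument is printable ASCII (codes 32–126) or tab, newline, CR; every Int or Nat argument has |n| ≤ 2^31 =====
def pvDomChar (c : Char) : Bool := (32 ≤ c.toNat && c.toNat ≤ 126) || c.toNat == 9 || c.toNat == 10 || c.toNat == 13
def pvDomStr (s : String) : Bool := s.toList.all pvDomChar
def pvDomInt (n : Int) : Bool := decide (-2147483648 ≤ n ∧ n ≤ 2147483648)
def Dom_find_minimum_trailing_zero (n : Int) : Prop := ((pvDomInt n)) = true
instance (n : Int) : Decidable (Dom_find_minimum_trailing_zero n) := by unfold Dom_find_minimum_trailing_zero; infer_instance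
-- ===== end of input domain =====

-- B replaces A's binary search over [0, 5n] by an arithmetic jump: the answer is 0 or a
-- multiple of 5 and exceeds 4n, so B walks up from the largest multiple of 5 ≤ 4n in steps
-- of 5. Return values are proved equal for all n.

-- ===== PORT A =====
-- while x >= 5: x //= 5; count += x   (fuel = x.toNat, enough since x strictly decreases; structural recursion)
def tzLoop : Nat → Int → Int → Int
  | 0, _, count => count
  | fuel + 1, x, count =>
    if 5 ≤ x then tzLoop fuel (PySem.Int.floordiv x 5) (count + PySem.Int.floordiv x 5)
    else count

def trailing_zero_count (x : Int) : Int := tzLoop x.toNat x 0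

-- while left <= right: mid = (left+right)//2; …   (fuel = (right+1-left).toNat at the call, enough since the gap shrinks)
def fmtzLoop : Nat → Int → Int → Int → Int → Int
  | 0, _, _, _, result => result
  | fuel + 1, n, left, right, result =>
    if left ≤ right then
      let mid := PySem.Int.floordiv (left + right) 2
      if n ≤ trailing_zero_count mid then fmtzLoop fuel n left (mid - 1) mid
      else fmtzLoop fuel n (mid + 1) right result
    else result

def find_minimum_trailing_zero (n : Int) : Int := fmtzLoop (n * 5 + 1).toNat n 0 (n * 5) (-1)

-- ===== PORT B =====
-- if n < 0: return -1
-- m = 4*n - (4*n) % 5; while trailing_zero_count(m) < n: m += 5; return m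
-- (fuel = n.toNat + 2 just makes the while-loop total; it is proved never to run out)
def scanGo : Nat → Int → Int → Int
  | 0, _, m => m
  | fuel + 1, n, m =>
    if n ≤ trailing_zero_count m then m else scanGo fuel n (m + 5)

def find_minimum_trailing_zero_alt (n : Int) : Int :=
  if n < 0 then -1
  else scanGo (n.toNat + 2) n (4 * n - PySem.Int.mod (4 * n) 5)

-- ===== PRECONDITION & SPEC =====
def Spec_find_minimum_trailing_zero (n : Int) (out : Int) : Prop := out = find_minimum_trailing_zero_alt n
instance (n : Int) (out : Int) : Decidable (Spec_find_minimum_trailing_zero n out) := by unfold Spec_find_minimum_trailing_zero; infer_instance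

-- ===== CLAIM (what is proved, stated in full; the proofs are below) =====
def Claim_equal_find_minimum_trailing_zero : Prop := ∀ (n : Int), Dom_find_minimum_trailing_zero n → Spec_find_minimum_trailing_zero n (find_minimum_trailing_zero n)

-- ===== LEMMAS AND PROOFS =====

theorem tzLoop_small (f : Nat) (x c : Int) (h : x < 5) : tzLoop f x c = c := by
  cases f with
  | zero => rfl
  | succ f => rw [tzLoop]; simp [show ¬ (5 ≤ x) by omega]

theorem tzLoop_shift (f : Nat) : ∀ x c d : Int, tzLoop f x (c + d) = tzLoop f x c + d := by
  induction f with
  | zero => intro x c d; rfl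
  | succ f ih =>
    intro x c d
    rw [tzLoop, tzLoop]
    by_cases h : 5 ≤ x
    · simp only [h, if_pos]
      have e : c + d + PySem.Int.floordiv x 5 = (c + PySem.Int.floordiv x 5) + d := by ring
      rw [e, ih]
    · simp [h]

theorem tzLoop_congr (f : Nat) : ∀ (g : Nat) (x c : Int), x.toNat ≤ f → x.toNat ≤ g →
    tzLoop f x c = tzLoop g x c := by
  induction f with
  | zero =>
    intro g x c hf _
    rw [tzLoop_small 0 x c (by omega), tzLoop_small g x c (by omega)]
  | succ f ih =>
    intro g x c hf hg
    by_cases h : 5 ≤ x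
    · have hg1 : ∃ g', g = g' + 1 := by
        cases g with
        | zero => omega
        | succ g' => exact ⟨g', rfl⟩
      obtain ⟨g', rfl⟩ := hg1
      rw [tzLoop, tzLoop]
      simp only [h, if_pos]
      have he : PySem.Int.floordiv x 5 = x / 5 := PySem.Int.floordiv_eq_ediv_of_pos (by omega)
      apply ih
      · rw [he]; omega
      · rw [he]; omega
    · rw [tzLoop_small _ x c (by omega), tzLoop_small _ x c (by omega)]

theorem tz_small {x : Int} (h : x < 5) : trailing_zero_count x = 0 := by
  unfold trailing_zero_count
  exact tzLoop_small _ x 0 h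

theorem tz_unfold {x : Int} (h : 5 ≤ x) :
    trailing_zero_count x = x / 5 + trailing_zero_count (x / 5) := by
  unfold trailing_zero_count
  have hx : ∃ k, x.toNat = k + 1 := ⟨x.toNat - 1, by omega⟩
  obtain ⟨k, hk⟩ := hx
  rw [hk, tzLoop]
  simp only [h, if_pos]
  have he : PySem.Int.floordiv x 5 = x / 5 := PySem.Int.floordiv_eq_ediv_of_pos (by omega)
  rw [he]
  have h0 : (0 : Int) + x / 5 = x / 5 := by ring
  rw [h0]
  have hsh : tzLoop k (x / 5) (x / 5) = tzLoop k (x / 5) (0 + (x / 5)) := by ring_nf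
  rw [hsh, tzLoop_shift]
  have hcg : tzLoop k (x / 5) 0 = tzLoop (x / 5).toNat (x / 5) 0 :=
    tzLoop_congr k (x / 5).toNat (x / 5) 0 (by omega) le_rfl
  omega

theorem tz_nonneg (x : Int) : 0 ≤ trailing_zero_count x := by
  by_cases h : 5 ≤ x
  · rw [tz_unfold h]
    have h1 : 1 ≤ x / 5 := by omega
    have := tz_nonneg (x / 5)
    omega
  · rw [tz_small (by omega)]
termination_by x.toNat
decreasing_by omega

theorem tz_mono {a b : Int} (h : a ≤ b) : trailing_zero_count a ≤ trailing_zero_count b := by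
  by_cases h5 : 5 ≤ a
  · have hb5 : 5 ≤ b := le_trans h5 h
    rw [tz_unfold h5, tz_unfold hb5]
    have hd : a / 5 ≤ b / 5 := by omega
    have := tz_mono hd
    omega
  · rw [tz_small (by omega)]; exact tz_nonneg b
termination_by b.toNat
decreasing_by omega

theorem tz_five_mul {n : Int} (h : 0 ≤ n) : n ≤ trailing_zero_count (5 * n) := by
  rcases eq_or_lt_of_le h with h0 | h1
  · rw [← h0]; simp [tz_small (by omega : (0:Int) < 5)]
  · have h5 : 5 ≤ 5 * n := by omega
    rw [tz_unfold h5]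
    have he : 5 * n / 5 = n := by omega
    rw [he]
    have := tz_nonneg n
    omega

-- tz(x) ≤ (x-1)/4 for x ≥ 1, i.e. the answer to 'tz ≥ n' exceeds 4n
theorem tz_upper {x : Int} (h : 1 ≤ x) : 4 * trailing_zero_count x ≤ x - 1 := by
  by_cases h5 : 5 ≤ x
  · rw [tz_unfold h5]
    have h1 : 1 ≤ x / 5 := by omega
    have := tz_upper h1
    omega
  · rw [tz_small (by omega)]; omega
termination_by x.toNat
decreasing_by omega

-- tz only changes across multiples of 5
theorem tz_pred {x : Int} (h1 : 1 ≤ x) (h5 : ¬ (5 ∣ x)) :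
    trailing_zero_count x = trailing_zero_count (x - 1) := by
  by_cases hx : 5 ≤ x
  · have hx6 : 6 ≤ x := by omega
    rw [tz_unfold hx, tz_unfold (show (5:Int) ≤ x - 1 by omega)]
    have he : x / 5 = (x - 1) / 5 := by omega
    rw [he]
  · rw [tz_small (by omega), tz_small (by omega)]

-- A's loop returns L, the least nonnegative integer with n ≤ tz L, under the binary-search invariant.
theorem fmtzLoop_correct (n L : Int) (hL0 : 0 ≤ L)
    (hPL : n ≤ trailing_zero_count L)
    (hleast : ∀ m : Int, 0 ≤ m → m < L → ¬ n ≤ trailing_zero_count m) :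
    ∀ (fuel : Nat) (left right result : Int), (right + 1 - left).toNat ≤ fuel → 0 ≤ left →
    (∀ m : Int, 0 ≤ m → m < left → ¬ n ≤ trailing_zero_count m) →
    ((L ≤ right ∧ (result = -1 ∨ L < result)) ∨ (result = L ∧ right < L)) →
    fmtzLoop fuel n left right result = L := by
  intro fuel
  induction fuel with
  | zero =>
    intro left right result hfuel hleft0 hLo hdisj
    have hlL : left ≤ L := by
      by_contra hc
      exact hLo L hL0 (by omega) hPL
    rw [fmtzLoop]
    rcases hdisj with ⟨h1, _⟩ | ⟨h1, _⟩
    · omega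
    · exact h1
  | succ fuel ih =>
    intro left right result hfuel hleft0 hLo hdisj
    have hlL : left ≤ L := by
      by_contra hc
      exact hLo L hL0 (by omega) hPL
    by_cases h : left ≤ right
    · have hmid := PySem.Int.floordiv_two_mid_bounds h
      rw [fmtzLoop]
      simp only [h, if_pos]
      by_cases hP : n ≤ trailing_zero_count (PySem.Int.floordiv (left + right) 2)
      · simp only [hP, if_pos]
        have hLm : L ≤ PySem.Int.floordiv (left + right) 2 := by
          by_contra hc
          exact hleast _ (by omega) (by omega) hP
        apply ih left _ _ (by omega) hleft0 hLo
        rcases lt_or_eq_of_le hLm with hlt | heq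
        · left; exact ⟨by omega, Or.inr hlt⟩
        · right; exact ⟨heq.symm, by omega⟩
      · simp only [hP, if_neg, not_false_iff]
        apply ih _ right result (by omega) (by omega)
        · intro m hm0 hmlt
          by_cases hml : m < left
          · exact hLo m hm0 hml
          · intro hPm
            exact hP (le_trans hPm (tz_mono (by omega)))
        · rcases hdisj with ⟨h1, h2⟩ | ⟨h1, h2⟩
          · left; exact ⟨h1, h2⟩
          · right; exact ⟨h1, h2⟩
    · rw [fmtzLoop]
      simp only [h, if_neg, not_false_iff]
      rcases hdisj with ⟨h1, _⟩ | ⟨h1, _⟩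
      · omega
      · exact h1

-- B's stride-5 scan reaches L from any multiple-of-5 start ≤ L, with enough fuel.
theorem scanGo_correct (n L : Int) (hPL : n ≤ trailing_zero_count L)
    (hleast : ∀ m : Int, 0 ≤ m → m < L → ¬ n ≤ trailing_zero_count m) :
    ∀ (fuel : Nat) (m : Int), 0 ≤ m → m ≤ L → (5 ∣ (L - m)) → ((L - m) / 5).toNat < fuel →
    scanGo fuel n m = L := by
  intro fuel
  induction fuel with
  | zero => intro m _ _ _ hf; omega
  | succ fuel ih =>
    intro m hm0 hmL hdvd hf
    rw [scanGo]
    by_cases hP : n ≤ trailing_zero_count m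
    · have : ¬ m < L := fun hc => hleast m hm0 hc hP
      simp only [hP, if_pos]
      omega
    · simp only [hP, if_neg, not_false_iff]
      have hne : m ≠ L := fun he => hP (he ▸ hPL)
      have hm5 : m + 5 ≤ L := by omega
      exact ih (m + 5) (by omega) hm5 (by omega) (by omega)

-- ===== VERDICT (by name: the statement is the Claim_ definition above) =====
theorem find_minimum_trailing_zero_spec : Claim_equal_find_minimum_trailing_zero := by
  intro n _
  unfold Spec_find_minimum_trailing_zero find_minimum_trailing_zero find_minimum_trailing_zero_alt
  by_cases hn : 0 ≤ n
  · have hex : ∃ k : ℕ, n ≤ trailing_zero_count (k : Int) := by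
      refine ⟨(5 * n).toNat, ?_⟩
      have : ((5 * n).toNat : Int) = 5 * n := by omega
      rw [this]
      exact tz_five_mul hn
    set K := Nat.find hex with hK
    have hPL : n ≤ trailing_zero_count (K : Int) := Nat.find_spec hex
    have hleast : ∀ m : Int, 0 ≤ m → m < (K : Int) → ¬ n ≤ trailing_zero_count m := by
      intro m hm0 hmK hPm
      have hmn : (m.toNat : Int) = m := by omega
      have h1 : m.toNat < K := by omega
      exact Nat.find_min hex h1 (by rw [hmn]; exact hPm)
    have hKle : (K : Int) ≤ n * 5 := by
      have hspec : n ≤ trailing_zero_count (((5 * n).toNat : ℕ) : Int) := by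
        have e : (((5 * n).toNat : ℕ) : Int) = 5 * n := by omega
        rw [e]; exact tz_five_mul hn
      have h2 : K ≤ (5 * n).toNat := Nat.find_le hspec
      omega
    -- the least solution is 0 (for n = 0) or a positive multiple of 5 above 4n
    have hKfacts : (5 ∣ (K : Int)) ∧ (n = 0 → (K : Int) = 0) ∧ (1 ≤ n → 4 * n < (K : Int)) := by
      rcases eq_or_lt_of_le hn with h0 | h1
      · have hz : (K : Int) = 0 := by
          have := hleast 0
          by_contra hc
          exact (hleast 0 le_rfl (by omega)) (by rw [tz_small (by omega)]; omega)
        exact ⟨by rw [hz]; exact ⟨0, by ring⟩, fun _ => hz, fun h => by omega⟩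
      · have hK1 : 1 ≤ (K : Int) := by
          by_contra hc
          have hz : (K : Int) = 0 := by omega
          rw [hz, tz_small (by omega)] at hPL
          omega
        have hdvd : 5 ∣ (K : Int) := by
          by_contra hnd
          exact hleast ((K : Int) - 1) (by omega) (by omega)
            (by rw [← tz_pred hK1 hnd]; exact hPL)
        have hlow : 4 * n < (K : Int) := by
          have := tz_upper hK1
          omega
        exact ⟨hdvd, fun h => by omega, fun _ => hlow⟩
    obtain ⟨hKdvd, hK0, hKlow⟩ := hKfacts
    rw [fmtzLoop_correct n (K : Int) (by omega) hPL hleast (n * 5 + 1).toNat 0 (n * 5) (-1)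
        (by omega) le_rfl
        (by intro m hm0 hml; omega)
        (Or.inl ⟨by omega, Or.inl rfl⟩)]
    simp only [show ¬ n < 0 by omega, if_neg, not_false_iff]
    have hmod : PySem.Int.mod (4 * n) 5 = (4 * n) % 5 :=
      PySem.Int.mod_eq_emod_of_pos (by omega)
    rw [hmod]
    have hstart5 : (5 : Int) ∣ (4 * n - (4 * n) % 5) := by omega
    have hstartK : 4 * n - (4 * n) % 5 ≤ (K : Int) := by
      rcases eq_or_lt_of_le hn with h0 | h1
      · have := hK0 (by omega); omega
      · have := hKlow (by omega); omega
    rw [scanGo_correct n (K : Int) hPL hleast (n.toNat + 2) (4 * n - (4 * n) % 5)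
        (by omega) hstartK (by omega) (by omega)]
  · have h0 : (n * 5 + 1).toNat = 0 := by omega
    rw [h0, fmtzLoop]
    simp [show n < 0 by omega]
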